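-- pv_equiv track=rewrite | github.com/gct02/AHLS | estimators/utils/cdfg.py | get_type_bitwidth
-- ===== SOURCE A (Python) =====
-- def get_type_bitwidth(text:str):
--     if '*' in text:
--         # Not a relevant information for now, just a placeholder
--         # The boolean feature "is_ptr" will be used instead
--         return 32
--     if '[' in text: # Array type
--         array_size = int(text.split('[')[1].split(' x')[0])
--         array_type = text.split('x ')[1].split(']')[0]
--         array_type_bitwidth = get_type_bitwidth(array_type)
--         return array_size * array_type_bitwidth
--     if 'float' in text:
--         return 32
--     if 'double' in text:
--         return 64
--     return int(text.strip('i'))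
-- ===== SOURCE B (Python) =====
-- def get_type_bitwidth(text: str):
--     product = 1
--     while True:
--         if '*' in text:
--             return 32
--         if '[' not in text:
--             break
--         product *= int(text.split('[')[1].split(' x')[0])
--         text = text.split('x ')[1].split(']')[0]
--     if 'float' in text:
--         base = 32
--     elif 'double' in text:
--         base = 64
--     else:
--         base = int(text.strip('i'))
--     return product * base
-- ===== Notes on version B (the rewrite author's own statement) =====
-- stated objective: alternative
-- what changed: Replaced A's recursive descent into the array element type with an iterative while-loop that accumulates the array-size product and computes the scalar base bitwidth once after the loop.
import Mathlib
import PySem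

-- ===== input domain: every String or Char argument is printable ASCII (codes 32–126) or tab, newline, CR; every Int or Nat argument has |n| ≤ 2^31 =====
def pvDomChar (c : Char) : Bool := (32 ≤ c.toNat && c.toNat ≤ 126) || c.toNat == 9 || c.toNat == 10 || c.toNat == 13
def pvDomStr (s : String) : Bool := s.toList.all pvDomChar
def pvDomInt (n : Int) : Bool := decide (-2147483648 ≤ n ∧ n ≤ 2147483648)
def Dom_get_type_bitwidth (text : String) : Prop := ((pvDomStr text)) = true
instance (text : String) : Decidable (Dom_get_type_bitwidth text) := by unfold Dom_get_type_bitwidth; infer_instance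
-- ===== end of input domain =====

-- B replaces A's recursion on the inner element type by an iterative loop with an
-- accumulated size product (objective: alternative decomposition, same cost).

-- ===== PORT A =====
-- A, transliterated: the recursive descent, totalized with a fuel guard (fuel = length+1;
-- `none` marks exactly the inputs where the Python raises, which Pre_ excludes).
def pvAGo (fuel : Nat) (cs : List Char) : Option Int :=
  match fuel with
  | 0 => none
  | fuel + 1 =>
    if PySem.Chars.isIn ['*'] cs then some 32
    else if PySem.Chars.isIn ['['] cs then
      match (PySem.Chars.splitOn cs ['['])[1]? with
      | none => none
      | some p1 =>
        match PySem.Int.ofChars? ((PySem.Chars.splitOn p1 [' ', 'x']).getD 0 []) with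
        | none => none
        | some array_size =>
          match (PySem.Chars.splitOn cs ['x', ' '])[1]? with
          | none => none
          | some p2 =>
            match pvAGo fuel ((PySem.Chars.splitOn p2 [']']).getD 0 []) with
            | none => none
            | some array_type_bitwidth => some (array_size * array_type_bitwidth)
    else if PySem.Chars.isIn ['f','l','o','a','t'] cs then some 32
    else if PySem.Chars.isIn ['d','o','u','b','l','e'] cs then some 64
    else PySem.Int.ofChars? (PySem.Chars.stripChars cs ['i'])

def get_type_bitwidth (text : String) : Int :=
  (pvAGo (text.toList.length + 1) text.toList).getD 0

-- ===== PORT B =====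
-- B, transliterated: the while-loop with the running product (same fuel totalization).
def pvBBase (cs : List Char) : Option Int :=
  if PySem.Chars.isIn ['f','l','o','a','t'] cs then some 32
  else if PySem.Chars.isIn ['d','o','u','b','l','e'] cs then some 64
  else PySem.Int.ofChars? (PySem.Chars.stripChars cs ['i'])

def pvBGo (fuel : Nat) (product : Int) (cs : List Char) : Option Int :=
  match fuel with
  | 0 => none
  | fuel + 1 =>
    if PySem.Chars.isIn ['*'] cs then some 32
    else if PySem.Chars.isIn ['['] cs then
      match (PySem.Chars.splitOn cs ['['])[1]? with
      | none => none
      | some p1 =>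
        match PySem.Int.ofChars? ((PySem.Chars.splitOn p1 [' ', 'x']).getD 0 []) with
        | none => none
        | some sz =>
          match (PySem.Chars.splitOn cs ['x', ' '])[1]? with
          | none => none
          | some p2 => pvBGo fuel (product * sz) ((PySem.Chars.splitOn p2 [']']).getD 0 [])
    else
      match pvBBase cs with
      | none => none
      | some base => some (product * base)

def get_type_bitwidth_alt (text : String) : Int :=
  (pvBGo (text.toList.length + 1) 1 text.toList).getD 0

-- ===== PRECONDITION & SPEC =====
-- "scalar" types on which A's leaf branch returns (float / double / iN with a parseable N)
def pvScalarOK (cs : List Char) : Prop :=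
  PySem.Chars.isIn ['f','l','o','a','t'] cs = true ∨
  PySem.Chars.isIn ['d','o','u','b','l','e'] cs = true ∨
  (PySem.Int.ofChars? (PySem.Chars.stripChars cs ['i'])).isSome = true

-- Exactly the inputs on which the Python A returns: an asterisk anywhere, a scalar type,
-- or a one-level array type whose size parses and whose element piece is a scalar.
-- (If the element piece itself still contains an opening bracket the Python always
-- raises — that piece can contain neither an asterisk nor the x-space separator — so no
-- returning input is excluded.)
def Pre_get_type_bitwidth (text : String) : Prop :=
  PySem.Chars.isIn ['*'] text.toList = true ∨
  (PySem.Chars.isIn ['*'] text.toList = false ∧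
    if PySem.Chars.isIn ['['] text.toList = true then
      2 ≤ (PySem.Chars.splitOn text.toList ['[']).length ∧
      2 ≤ (PySem.Chars.splitOn text.toList ['x', ' ']).length ∧
      (PySem.Int.ofChars? ((PySem.Chars.splitOn ((PySem.Chars.splitOn text.toList ['[']).getD 1 []) [' ', 'x']).getD 0 [])).isSome = true ∧
      (PySem.Chars.isIn ['['] ((PySem.Chars.splitOn ((PySem.Chars.splitOn text.toList ['x', ' ']).getD 1 []) [']']).getD 0 []) = false ∧
       PySem.Chars.isIn ['*'] ((PySem.Chars.splitOn ((PySem.Chars.splitOn text.toList ['x', ' ']).getD 1 []) [']']).getD 0 []) = false ∧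
       pvScalarOK ((PySem.Chars.splitOn ((PySem.Chars.splitOn text.toList ['x', ' ']).getD 1 []) [']']).getD 0 []))
    else pvScalarOK text.toList)

instance (text : String) : Decidable (Pre_get_type_bitwidth text) := by
  unfold Pre_get_type_bitwidth pvScalarOK; infer_instance

def pvWitness_get_type_bitwidth : String := "[4 x i32]"

def Spec_get_type_bitwidth (text : String) (out : Int) : Prop := out = get_type_bitwidth_alt text
instance (text : String) (out : Int) : Decidable (Spec_get_type_bitwidth text out) := by unfold Spec_get_type_bitwidth; infer_instance

-- ===== CLAIM (what is proved, stated in full; the proofs are below) =====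
def Claim_equal_get_type_bitwidth : Prop := ∀ (text : String), Dom_get_type_bitwidth text → Pre_get_type_bitwidth text → Spec_get_type_bitwidth text (get_type_bitwidth text)

-- ===== LEMMAS AND PROOFS =====
theorem pv_scalar_A (cs : List Char) (f : Nat)
    (hs : PySem.Chars.isIn ['*'] cs = false) (hb : PySem.Chars.isIn ['['] cs = false) :
    pvAGo (f + 1) cs = pvBBase cs := by
  simp [pvAGo, pvBBase, hs, hb]

theorem pv_scalar_B (cs : List Char) (f : Nat) (p : Int)
    (hs : PySem.Chars.isIn ['*'] cs = false) (hb : PySem.Chars.isIn ['['] cs = false)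
    (hok : pvScalarOK cs) : ∃ b, pvBBase cs = some b ∧ pvBGo (f + 1) p cs = some (p * b) := by
  have hb' : ∃ b, pvBBase cs = some b := by
    rcases hok with h | h | h
    · exact ⟨32, by simp [pvBBase, h]⟩
    · by_cases hf : PySem.Chars.isIn ['f','l','o','a','t'] cs = true
      · exact ⟨32, by simp [pvBBase, hf]⟩
      · exact ⟨64, by simp [pvBBase, hf, h]⟩
    · by_cases hf : PySem.Chars.isIn ['f','l','o','a','t'] cs = true
      · exact ⟨32, by simp [pvBBase, hf]⟩
      · by_cases hd : PySem.Chars.isIn ['d','o','u','b','l','e'] cs = true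
        · exact ⟨64, by simp [pvBBase, hf, hd]⟩
        · obtain ⟨b, hbb⟩ := Option.isSome_iff_exists.mp h
          exact ⟨b, by simp [pvBBase, hf, hd, hbb]⟩
  obtain ⟨b, hbb⟩ := hb'
  exact ⟨b, hbb, by simp [pvBGo, hs, hb, hbb]⟩

theorem pv_arr_A (cs p1 p2 : List Char) (f : Nat) (sz : Int)
    (hs : PySem.Chars.isIn ['*'] cs = false) (hb : PySem.Chars.isIn ['['] cs = true)
    (hp1 : (PySem.Chars.splitOn cs ['['])[1]? = some p1)
    (hsz : PySem.Int.ofChars? ((PySem.Chars.splitOn p1 [' ', 'x']).getD 0 []) = some sz)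
    (hp2 : (PySem.Chars.splitOn cs ['x', ' '])[1]? = some p2) :
    pvAGo (f + 1) cs =
      match pvAGo f ((PySem.Chars.splitOn p2 [']']).getD 0 []) with
      | none => none
      | some b => some (sz * b) := by
  simp only [pvAGo, hs, hb, Bool.false_eq_true, if_false, if_true, hp1, hp2, hsz]

theorem pv_arr_B (cs p1 p2 : List Char) (f : Nat) (p sz : Int)
    (hs : PySem.Chars.isIn ['*'] cs = false) (hb : PySem.Chars.isIn ['['] cs = true)
    (hp1 : (PySem.Chars.splitOn cs ['['])[1]? = some p1)
    (hsz : PySem.Int.ofChars? ((PySem.Chars.splitOn p1 [' ', 'x']).getD 0 []) = some sz)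
    (hp2 : (PySem.Chars.splitOn cs ['x', ' '])[1]? = some p2) :
    pvBGo (f + 1) p cs = pvBGo f (p * sz) ((PySem.Chars.splitOn p2 [']']).getD 0 []) := by
  simp only [pvBGo, hs, hb, Bool.false_eq_true, if_false, if_true, hp1, hp2, hsz]

-- ===== VERDICT (by name: the statement is the Claim_ definition above) =====
theorem get_type_bitwidth_spec : Claim_equal_get_type_bitwidth := by
  intro text _ hpre
  unfold Spec_get_type_bitwidth get_type_bitwidth get_type_bitwidth_alt
  rcases hpre with hstar | ⟨hstar, hpre⟩
  · simp [pvAGo, pvBGo, hstar]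
  · by_cases hbr : PySem.Chars.isIn ['['] text.toList = true
    · rw [if_pos hbr] at hpre
      obtain ⟨hl1, hl2, hsz, hin1, hin2, hok⟩ := hpre
      have hne : text.toList ≠ [] := by
        intro h; rw [h] at hbr; exact absurd hbr (by decide)
      obtain ⟨m, hm⟩ : ∃ m, text.toList.length = m + 1 :=
        ⟨text.toList.length - 1, by have := List.length_pos_of_ne_nil hne; omega⟩
      have hp1 : (PySem.Chars.splitOn text.toList ['['])[1]? =
          some ((PySem.Chars.splitOn text.toList ['[']).getD 1 []) := by
        rw [List.getD_eq_getElem _ _ (by omega), List.getElem?_eq_getElem (by omega)]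
      have hp2 : (PySem.Chars.splitOn text.toList ['x', ' '])[1]? =
          some ((PySem.Chars.splitOn text.toList ['x', ' ']).getD 1 []) := by
        rw [List.getD_eq_getElem _ _ (by omega), List.getElem?_eq_getElem (by omega)]
      obtain ⟨sz, hsz'⟩ := Option.isSome_iff_exists.mp hsz
      obtain ⟨b, hbb, hB⟩ := pv_scalar_B
        ((PySem.Chars.splitOn ((PySem.Chars.splitOn text.toList ['x', ' ']).getD 1 []) [']']).getD 0 [])
        m (1 * sz) hin2 hin1 hok
      have hA := pv_scalar_A
        ((PySem.Chars.splitOn ((PySem.Chars.splitOn text.toList ['x', ' ']).getD 1 []) [']']).getD 0 [])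
        m hin2 hin1
      rw [hm, pv_arr_A _ _ _ _ _ hstar hbr hp1 hsz' hp2,
          pv_arr_B _ _ _ _ _ _ hstar hbr hp1 hsz' hp2, hA, hbb, hB]
      simp [mul_comm]
    · rw [if_neg hbr] at hpre
      have hbr' : PySem.Chars.isIn ['['] text.toList = false := by simpa using hbr
      obtain ⟨b, hbb, hB⟩ := pv_scalar_B text.toList text.toList.length 1 hstar hbr' hpre
      rw [pv_scalar_A text.toList text.toList.length hstar hbr', hbb, hB]
      simp
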